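-- pv_equiv track=rewrite | github.com/seng-2021/lab-BuiDuong2673 | Lab1Software/Coursework.py | check_parity
-- ===== SOURCE A (Python) =====
-- def get_parity(n):
--     while n > 1:
--         n = (n >> 1) ^ (n & 1)
--     return n
--
-- def check_parity(message):
--     a_message = ""
--     for character in message:
--         character = ord(character)
--         char = character >> 1
--         if (character & 1) != get_parity(char):
--             return ""
--         a_message += chr(char)
--     return a_message
-- ===== SOURCE B (Python) =====
-- _PARITY_NIBBLE = (0, 1, 1, 0, 1, 0, 0, 1, 1, 0, 0, 1, 0, 1, 1, 0)
--
-- def _odd_parity(b):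
--     p = 0
--     while b:
--         p ^= _PARITY_NIBBLE[b & 15]
--         b >>= 4
--     return p
--
-- def check_parity(message):
--     codes = [ord(c) for c in message]
--     if any(_odd_parity(b) for b in codes):
--         return ""
--     return "".join(chr(b >> 1) for b in codes)
-- ===== Notes on version B (the rewrite author's own statement) =====
-- stated objective: alternative
-- what changed: Replaces A's single early-return loop with its per-character bit-folding helper by a staged pipeline: extract all codes, validate them all at once with any() over a precomputed 16-entry nibble parity lookup table (odd popcount of the whole byte means corrupt, via the identity bit0 != parity(b>>1) iff b has odd popcount), then decode and join in a separate pass.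
import Mathlib
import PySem

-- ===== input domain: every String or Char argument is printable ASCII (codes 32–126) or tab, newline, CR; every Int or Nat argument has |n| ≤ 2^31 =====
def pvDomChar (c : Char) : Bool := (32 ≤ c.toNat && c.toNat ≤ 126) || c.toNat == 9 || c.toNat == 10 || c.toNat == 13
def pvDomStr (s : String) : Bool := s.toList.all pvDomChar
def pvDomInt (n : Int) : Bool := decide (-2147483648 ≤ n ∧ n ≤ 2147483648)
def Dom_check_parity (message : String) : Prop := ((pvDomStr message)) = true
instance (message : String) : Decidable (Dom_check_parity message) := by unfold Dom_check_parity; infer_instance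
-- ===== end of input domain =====

-- B replaces A's early-return loop + bit-folding helper by a staged pipeline: extract codes,
-- validate all of them with a 16-entry nibble parity table, then decode and join; objective: alternative.

-- termination helper for get_parity's while loop: xor with the single bit 1 only flips bit 0
theorem pv_xor_one (m : Nat) : m ^^^ 1 = 2 * (m / 2) + (1 - m % 2) := by
  apply Nat.eq_of_testBit_eq
  intro i
  cases i with
  | zero =>
    simp only [Nat.testBit_zero]
    rcases Nat.mod_two_eq_zero_or_one m with h | h <;> simp [h] <;> omega
  | succ j =>
    simp only [Nat.testBit_succ]
    have hx : (m ^^^ 1) / 2 = m / 2 := by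
      rw [← Nat.shiftRight_one, Nat.shiftRight_xor_distrib, Nat.shiftRight_one,
        Nat.shiftRight_one]
      norm_num
    have hr : (2 * (m / 2) + (1 - m % 2)) / 2 = m / 2 := by omega
    rw [hx, hr]

-- ===== PORT A =====
-- A's while-loop helper: folds the bits of n down into a single parity bit.
def get_parity (n : Nat) : Nat :=
  if _h : n > 1 then get_parity ((n >>> 1) ^^^ (n &&& 1)) else n
  termination_by n
  decreasing_by
    rw [Nat.shiftRight_one, Nat.and_one_is_mod]
    rcases Nat.mod_two_eq_zero_or_one n with hm | hm
    · rw [hm, Nat.xor_zero]; omega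
    · rw [hm, pv_xor_one]; omega

-- A's loop with its string accumulator and early return "".
def check_parity_aux (cs : List Char) (acc : String) : String :=
  match cs with
  | [] => acc
  | c :: rest =>
    let character := c.toNat          -- ord(character): exact
    let ch := character >>> 1
    if (character &&& 1) ≠ get_parity ch then ""
    else check_parity_aux rest (acc.push (Char.ofNat ch))   -- chr(ch): exact, ch < 0xD800 on Dom

def check_parity (message : String) : String :=
  check_parity_aux message.toList ""

-- ===== PORT B =====
-- B's precomputed parity-of-nibble lookup table _PARITY_NIBBLE.
def nibTable : List Nat := [0, 1, 1, 0, 1, 0, 0, 1, 1, 0, 0, 1, 0, 1, 1, 0]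

-- B's _odd_parity while loop: fold the nibbles of b through the table.
-- The index b &&& 15 is always < 16, so the in-range tuple indexing is exact as getD.
def odd_parity_go (b p : Nat) : Nat :=
  if _h : b ≠ 0 then odd_parity_go (b >>> 4) (p ^^^ nibTable.getD (b &&& 15) 0) else p
  termination_by b
  decreasing_by
    rw [Nat.shiftRight_eq_div_pow]
    omega

def odd_parity (b : Nat) : Nat := odd_parity_go b 0

def check_parity_alt (message : String) : String :=
  let codes := message.toList.map (fun c => c.toNat)          -- [ord(c) for c in message]
  if codes.any (fun b => odd_parity b != 0) then ""           -- any(_odd_parity(b) for b in codes)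
  else String.ofList (codes.map (fun b => Char.ofNat (b >>> 1)))  -- "".join(chr(b >> 1) …)

-- ===== PRECONDITION & SPEC =====
def Spec_check_parity (message : String) (out : String) : Prop := out = check_parity_alt message
instance (message : String) (out : String) : Decidable (Spec_check_parity message out) := by unfold Spec_check_parity; infer_instance

-- ===== CLAIM (what is proved, stated in full; the proofs are below) =====
def Claim_equal_check_parity : Prop := ∀ (message : String), Dom_check_parity message → Spec_check_parity message (check_parity message)

-- ===== LEMMAS AND PROOFS =====

-- popcount, the common spec of both parity computations (proof-only helper)
def countOnes (b : Nat) : Nat :=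
  if b = 0 then 0 else b % 2 + countOnes (b / 2)
  termination_by b
  decreasing_by omega

theorem countOnes_zero : countOnes 0 = 0 := by rw [countOnes]; simp

theorem countOnes_step (b : Nat) :
    countOnes b = b % 2 + countOnes (b / 2) := by
  by_cases h : b = 0
  · subst h; simp [countOnes_zero]
  · conv_lhs => rw [countOnes]; rw [if_neg h]

theorem countOnes_lt16 (m : Nat) (h : m < 16) :
    countOnes m = m % 2 + m / 2 % 2 + m / 4 % 2 + m / 8 % 2 := by
  rw [countOnes_step m, countOnes_step (m / 2), countOnes_step (m / 2 / 2),
    countOnes_step (m / 2 / 2 / 2)]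
  have h16 : m / 2 / 2 / 2 / 2 = 0 := by omega
  rw [h16, countOnes_zero]
  omega

theorem countOnes_split16 (b : Nat) :
    countOnes b = countOnes (b % 16) + countOnes (b / 16) := by
  rw [countOnes_step b, countOnes_step (b / 2), countOnes_step (b / 2 / 2),
    countOnes_step (b / 2 / 2 / 2), countOnes_lt16 (b % 16) (by omega)]
  have : b / 2 / 2 / 2 / 2 = b / 16 := by omega
  rw [this]
  omega

-- xoring a single bit into m flips the parity of m's popcount accordingly
theorem countOnes_xor_bit (m r : Nat) (hr : r ≤ 1) :
    countOnes (m ^^^ r) % 2 = (countOnes m + r) % 2 := by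
  interval_cases r
  · rw [Nat.xor_zero, Nat.add_zero]
  · rw [pv_xor_one]
    rcases Nat.mod_two_eq_zero_or_one m with hm | hm
    · by_cases h0 : m = 0
      · subst h0
        norm_num [countOnes_step 1, countOnes_zero]
      · rw [countOnes_step (2 * (m / 2) + (1 - m % 2)), countOnes_step m]
        have : (2 * (m / 2) + (1 - m % 2)) / 2 = m / 2 := by omega
        rw [this]
        omega
    · by_cases h0 : m / 2 = 0
      · have hm1 : m = 1 := by omega
        subst hm1
        norm_num [countOnes_step 1, countOnes_zero]
      · rw [countOnes_step (2 * (m / 2) + (1 - m % 2)), countOnes_step m]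
        have : (2 * (m / 2) + (1 - m % 2)) / 2 = m / 2 := by omega
        rw [this]
        omega

-- A's helper computes the popcount parity
theorem get_parity_eq (n : Nat) : get_parity n = countOnes n % 2 := by
  induction n using Nat.strong_induction_on with
  | _ n ih =>
    rw [get_parity]
    by_cases h : n > 1
    · rw [dif_pos h]
      have hlt : (n >>> 1) ^^^ (n &&& 1) < n := by
        rw [Nat.shiftRight_one, Nat.and_one_is_mod]
        rcases Nat.mod_two_eq_zero_or_one n with hm | hm
        · rw [hm, Nat.xor_zero]; omega
        · rw [hm, pv_xor_one]; omega
      rw [ih _ hlt, Nat.shiftRight_one, Nat.and_one_is_mod,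
        countOnes_xor_bit (n / 2) (n % 2) (by omega),
        countOnes_step n]
      omega
    · rw [dif_neg h]
      interval_cases n
      · rw [countOnes_zero]
      · rw [countOnes_step 1, countOnes_zero]

-- the nibble table tabulates the popcount parity of 0..15
theorem nibTable_eq (m : Nat) (h : m < 16) :
    nibTable.getD m 0 = countOnes m % 2 := by
  interval_cases m <;> simp [nibTable, countOnes_lt16]

-- B's table-driven helper also computes the popcount parity
theorem odd_parity_go_eq (b : Nat) : ∀ p, p ≤ 1 →
    odd_parity_go b p = (p + countOnes b) % 2 := by
  induction b using Nat.strong_induction_on with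
  | _ b ih =>
    intro p hp
    rw [odd_parity_go]
    by_cases h : b = 0
    · rw [dif_neg (by simp [h]), h, countOnes_zero]
      omega
    · rw [dif_pos h]
      have hand : b &&& 15 = b % 16 := by
        have := Nat.and_two_pow_sub_one_eq_mod b 4
        simpa using this
      have hshift : b >>> 4 = b / 16 := by
        rw [Nat.shiftRight_eq_div_pow]
      have ht : nibTable.getD (b &&& 15) 0 = countOnes (b % 16) % 2 := by
        rw [hand, nibTable_eq (b % 16) (by omega)]
      have ht1 : nibTable.getD (b &&& 15) 0 ≤ 1 := by
        rw [ht]; omega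
      have hxor : p ^^^ nibTable.getD (b &&& 15) 0 =
          (p + countOnes (b % 16) % 2) % 2 := by
        rw [ht]
        interval_cases p <;>
          rcases Nat.mod_two_eq_zero_or_one (countOnes (b % 16)) with hm | hm <;>
          simp [hm]
      rw [hshift, ih (b / 16) (by omega) _ (by rw [hxor]; omega), hxor,
        countOnes_split16 b]
      omega

theorem odd_parity_eq (b : Nat) : odd_parity b = countOnes b % 2 := by
  rw [odd_parity, odd_parity_go_eq b 0 (by omega)]; omega

-- the two per-character tests agree: bit0 ≠ parity(b >>> 1)  ↔  b has odd popcount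
theorem cond_eq (b : Nat) :
    ((b &&& 1) ≠ get_parity (b >>> 1)) ↔ (odd_parity b != 0) = true := by
  rw [get_parity_eq, odd_parity_eq, Nat.and_one_is_mod, Nat.shiftRight_one,
    bne_iff_ne]
  by_cases hb : b = 0
  · subst hb; simp [countOnes_zero]
  · rw [countOnes_step b]
    have := Nat.mod_two_eq_zero_or_one b
    have := Nat.mod_two_eq_zero_or_one (countOnes (b / 2))
    constructor <;> intro h <;> omega

theorem push_append_ofList (acc : String) (c : Char) (t : List Char) :
    (acc.push c) ++ String.ofList t = acc ++ String.ofList (c :: t) := by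
  apply String.toList_inj.mp
  simp

-- loop invariant: A's early-return loop equals B's validate-then-decode pipeline
theorem aux_eq (cs : List Char) (acc : String) :
    check_parity_aux cs acc =
      if (cs.map (fun c => c.toNat)).any (fun b => odd_parity b != 0) then ""
      else acc ++ String.ofList ((cs.map (fun c => c.toNat)).map
        (fun b => Char.ofNat (b >>> 1))) := by
  induction cs generalizing acc with
  | nil => simp [check_parity_aux]
  | cons c rest ih =>
    rw [check_parity_aux]
    simp only [List.map_cons, List.any_cons]
    by_cases h : (odd_parity c.toNat != 0) = true
    · rw [if_pos ((cond_eq c.toNat).mpr h), h]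
      simp
    · rw [if_neg (fun hc => h ((cond_eq c.toNat).mp hc)), ih]
      simp only [Bool.not_eq_true] at h
      rw [h, Bool.false_or]
      by_cases hr : (rest.map (fun c => c.toNat)).any (fun b => odd_parity b != 0) = true
      · rw [if_pos hr, if_pos hr]
      · rw [if_neg hr, if_neg hr]
        exact push_append_ofList acc (Char.ofNat (c.toNat >>> 1)) _

-- ===== VERDICT (by name: the statement is the Claim_ definition above) =====
theorem check_parity_spec : Claim_equal_check_parity := by
  intro message _
  unfold Spec_check_parity check_parity check_parity_alt
  rw [aux_eq]
  simp
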